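-- pv_equiv track=rewrite | github.com/Gendo90/topCoder | 400-600 pts/topcoderTwain.py | yearSeven
-- ===== SOURCE A (Python) =====
-- def yearSeven(words):
--     words = words.split(" ")
--     vowels = {'a':True, 'e':True, 'i':True, 'o':True, 'u': True}
--     newWords = []
--     for word in words:
--         this_word = [a for a in word]
--         i = 0
--         while(i<len(this_word)):
--             if(i+1<len(this_word)):
--                 if(this_word[i]==this_word[i+1] and this_word[i] not in vowels):
--                     this_word.pop(i+1)
--                     i-=1
--             i+=1
--         this_word = "".join(a for a in this_word)
--         newWords.append(this_word)
--     words = " ".join(newWords)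
--     return words
-- ===== SOURCE B (Python) =====
-- def yearSeven(words):
--     # Two-pointer run grouping: for each word, scan maximal runs of equal
--     # characters; keep a vowel run whole (slice), collapse any other run to one char.
--     vowels = 'aeiou'
--     new = []
--     for w in words.split(' '):
--         pieces = []
--         i = 0
--         n = len(w)
--         while i < n:
--             j = i + 1
--             while j < n and w[j] == w[i]:
--                 j += 1
--             pieces.append(w[i:j] if w[i] in vowels else w[i])
--             i = j
--         new.append(''.join(pieces))
--     return ' '.join(new)
-- ===== Notes on version B (the rewrite author's own statement) =====
-- stated objective: faster
-- what changed: Replaced the index-walking while loop that pops duplicate neighbours out of a char list in place with a two-pointer run scan: each word is split into maximal runs of equal characters, a vowel run is kept whole and every other run collapses to its first character.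
import Mathlib
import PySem

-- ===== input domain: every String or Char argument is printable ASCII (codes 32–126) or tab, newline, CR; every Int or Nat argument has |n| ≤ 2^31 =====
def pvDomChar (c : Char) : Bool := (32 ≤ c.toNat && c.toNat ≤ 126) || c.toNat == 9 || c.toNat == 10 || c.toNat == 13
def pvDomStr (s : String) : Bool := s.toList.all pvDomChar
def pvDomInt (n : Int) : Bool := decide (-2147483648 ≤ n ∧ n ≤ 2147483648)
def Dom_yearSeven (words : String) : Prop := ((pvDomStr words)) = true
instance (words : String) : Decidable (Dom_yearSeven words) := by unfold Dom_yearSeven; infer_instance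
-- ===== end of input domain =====

-- B replaces A's quadratic in-place pop loop by a linear two-pointer run scan per word; same return value on every input.

-- ===== PORT A =====
-- the vowels dict of A (values are irrelevant, only key membership is used)
def pvVowelsA : PySem.Dict Char Bool :=
  ((((PySem.Dict.empty.insert 'a' true).insert 'e' true).insert 'i' true).insert 'o' true).insert 'u' true

-- A's while loop over (this_word, i); the pop branch does i -= 1 then i += 1, i.e. keeps i
def pvLoopA (l : List Char) (i : Nat) : List Char :=
  if _h : i < l.length then
    if _h2 : i + 1 < l.length then
      if l.getD i ' ' == l.getD (i+1) ' ' && !(pvVowelsA.contains (l.getD i ' ')) then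
        pvLoopA (l.eraseIdx (i+1)) i          -- this_word.pop(i+1); i -= 1; i += 1
      else pvLoopA l (i+1)
    else pvLoopA l (i+1)
  else l
termination_by 2 * l.length - i
decreasing_by
  · have : (l.eraseIdx (i+1)).length = l.length - 1 := by
      rw [List.length_eraseIdx_of_lt _h2]
    omega
  · omega
  · omega

def yearSeven (words : String) : String :=
  let ws := PySem.Chars.splitOn words.toList [' ']          -- words.split(" ")
  let newWords := ws.map (fun w => pvLoopA w 0)             -- per-word pop loop, then "".join
  String.mk (PySem.Chars.join [' '] newWords)               -- " ".join(newWords)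

-- ===== PORT B =====
def pvVowelsB : List Char := ['a', 'e', 'i', 'o', 'u']   -- the chars of 'aeiou'

-- Source B's outer while over i as recursion on the suffix w[i:]; the inner
-- `while j < n and w[j] == w[i]` scan is the takeWhile run of the suffix,
-- w[i:j] is c :: that run; (single-char `c in str` = char membership)
def pvPiecesB : List Char → List (List Char)
  | [] => []
  | c :: rest =>
    let run := rest.takeWhile (· == c)
    (if c ∈ pvVowelsB then c :: run else [c]) :: pvPiecesB (rest.drop run.length)
termination_by l => l.length
decreasing_by
  simp [List.length_drop]

def pvCollapseB (w : List Char) : List Char :=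
  (pvPiecesB w).flatten                                   -- ''.join(pieces)

def yearSeven_alt (words : String) : String :=
  let ws := PySem.Chars.splitOn words.toList [' ']
  let new := ws.map (fun w => pvCollapseB w)
  String.mk (PySem.Chars.join [' '] new)

-- ===== PRECONDITION & SPEC =====
def Spec_yearSeven (words : String) (out : String) : Prop := out = yearSeven_alt words
instance (words : String) (out : String) : Decidable (Spec_yearSeven words out) := by unfold Spec_yearSeven; infer_instance

-- ===== CLAIM (what is proved, stated in full; the proofs are below) =====
def Claim_equal_yearSeven : Prop := ∀ (words : String), Dom_yearSeven words → Spec_yearSeven words (yearSeven words)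

-- ===== LEMMAS AND PROOFS =====

theorem pvBeqSwap (a c : Char) : (a == c) = decide (c = a) := by
  by_cases h : c = a
  · subst h; simp
  · have h2 : a ≠ c := fun hh => h hh.symm
    simp [h, h2]

theorem pvBeqComm (a b : Char) : (a == b) = (b == a) := by
  by_cases h : a = b
  · subst h; rfl
  · have h2 : b ≠ a := fun hh => h hh.symm
    simp [h, h2]

theorem pvVowel_eq (c : Char) : pvVowelsA.contains c = decide (c ∈ pvVowelsB) := by
  simp [pvVowelsA, pvVowelsB, PySem.Dict.contains, PySem.Dict.empty, PySem.Dict.insert,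
    List.mem_cons, or_assoc, pvBeqSwap]

-- functional description of A's loop tail: prev char p, remaining suffix
def pvDedupFrom (p : Char) : List Char → List Char
  | [] => []
  | c :: r => if c == p && !(pvVowelsA.contains p) then pvDedupFrom p r
              else c :: pvDedupFrom c r

theorem pvLoopA_inv (l : List Char) (i : Nat) (hi : i < l.length) :
    pvLoopA l i = l.take (i+1) ++ pvDedupFrom (l.getD i ' ') (l.drop (i+1)) := by
  rw [pvLoopA, dif_pos hi]
  by_cases h2 : i + 1 < l.length
  · rw [dif_pos h2]
    have hdrop : l.drop (i+1) = l[i+1] :: l.drop (i+2) := List.drop_eq_getElem_cons h2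
    have hgd1 : l.getD (i+1) ' ' = l[i+1] := by
      simp [List.getD, List.getElem?_eq_getElem h2]
    by_cases hc : (l.getD i ' ' == l.getD (i+1) ' ' && !(pvVowelsA.contains (l.getD i ' '))) = true
    · rw [if_pos hc]
      have hlen : (l.eraseIdx (i+1)).length = l.length - 1 := List.length_eraseIdx_of_lt h2
      rw [pvLoopA_inv (l.eraseIdx (i+1)) i (by omega)]
      have he : l.eraseIdx (i+1) = l.take (i+1) ++ l.drop (i+2) :=
        List.eraseIdx_eq_take_drop_succ l (i+1)
      have hlt : (l.take (i+1)).length = i + 1 := by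
        simp [List.length_take]; omega
      have htake : (l.eraseIdx (i+1)).take (i+1) = l.take (i+1) := by
        rw [he, List.take_left' hlt]
      have hdrop' : (l.eraseIdx (i+1)).drop (i+1) = l.drop (i+2) := by
        rw [he, List.drop_left' hlt]
      have hgd0 : (l.eraseIdx (i+1)).getD i ' ' = l.getD i ' ' := by
        rw [he]
        simp [List.getD, List.getElem?_append_left (by omega : i < (l.take (i+1)).length),
          List.getElem?_take, Nat.lt_succ_self]
      rw [htake, hdrop', hgd0]
      have hc' := hc
      simp only [Bool.and_eq_true] at hc'
      obtain ⟨hceq, hcv⟩ := hc'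
      have hpc : l.getD i ' ' = l[i+1] := by
        rw [hgd1] at hceq; exact beq_iff_eq.mp hceq
      have hcv' : pvVowelsA.contains (l.getD i ' ') = false := by
        revert hcv; cases pvVowelsA.contains (l.getD i ' ') <;> simp
      conv_rhs => rw [hdrop, pvDedupFrom]
      rw [if_pos (by rw [← hpc, hcv']; simp)]
    · rw [if_neg hc]
      rw [pvLoopA_inv l (i+1) h2]
      conv_rhs => rw [hdrop, pvDedupFrom]
      rw [if_neg (by rw [pvBeqComm, ← hgd1]; exact hc)]
      have htk : List.take (i+1+1) l = List.take (i+1) l ++ [l[i+1]] := by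
        rw [List.take_add_one, List.getElem?_eq_getElem h2]
        rfl
      rw [hgd1, htk, List.append_assoc]
      rfl
  · rw [dif_neg h2, pvLoopA, dif_neg h2]
    have h3 : l.length ≤ i + 1 := by omega
    rw [List.drop_eq_nil_of_le h3, List.take_of_length_le h3]
    simp [pvDedupFrom]

theorem pvDrop_takeWhile (l : List Char) (p : Char → Bool) :
    l.drop (l.takeWhile p).length = l.dropWhile p := by
  induction l with
  | nil => rfl
  | cons a l ih =>
    by_cases h : p a <;> simp [List.takeWhile_cons, List.dropWhile_cons, h, ih]

theorem pvDropWhile_head (p : Char → Bool) : ∀ (l : List Char) (x : Char) (r : List Char),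
    l.dropWhile p = x :: r → p x = false := by
  intro l
  induction l with
  | nil => intro x r h; simp at h
  | cons a l ih =>
    intro x r h
    by_cases hp : p a
    · simp [hp] at h; exact ih _ _ h
    · simp [hp] at h; simpa [h.1] using hp

-- A's whole per-word pass, functionally
def pvDedup : List Char → List Char
  | [] => []
  | c :: r => c :: pvDedupFrom c r

theorem pvDedup_run (c : Char) (r : List Char) : ∀ t : List Char, (∀ x ∈ t, x = c) →
    pvDedupFrom c (t ++ r) = (if pvVowelsA.contains c then t else []) ++ pvDedupFrom c r := by
  intro t
  induction t with
  | nil => simp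
  | cons a t ih =>
    intro h
    have ha : a = c := h a (by simp)
    subst ha
    have ht : ∀ x ∈ t, x = a := fun x hx => h x (List.mem_cons_of_mem _ hx)
    by_cases hv : pvVowelsA.contains a
    · simp [pvDedupFrom, hv, ih ht]
    · simp [pvDedupFrom, hv, ih ht]

theorem pvDedup_head (c x : Char) (r : List Char) (h : (x == c) = false) :
    pvDedupFrom c (x :: r) = x :: pvDedupFrom x r := by
  simp [pvDedupFrom, h]

theorem pvCollapse_eq (l : List Char) : pvDedup l = pvCollapseB l := by
  match l with
  | [] => simp [pvDedup, pvCollapseB, pvPiecesB]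
  | c :: rest =>
    have hd : rest.drop (rest.takeWhile (· == c)).length = rest.dropWhile (· == c) :=
      pvDrop_takeWhile rest (· == c)
    have hsplit : rest.takeWhile (· == c) ++ rest.drop (rest.takeWhile (· == c)).length = rest := by
      rw [hd, List.takeWhile_append_dropWhile]
    have ht : ∀ x ∈ rest.takeWhile (· == c), x = c := by
      intro x hx
      have hb := List.mem_takeWhile_imp hx
      exact beq_iff_eq.mp hb
    have hrest : pvDedupFrom c (rest.drop (rest.takeWhile (· == c)).length) =
        pvCollapseB (rest.drop (rest.takeWhile (· == c)).length) := by
      cases hD : rest.drop (rest.takeWhile (· == c)).length with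
      | nil => simp [pvDedupFrom, pvCollapseB, pvPiecesB]
      | cons x r =>
        have hx : (x == c) = false := by
          rw [hd] at hD
          exact pvDropWhile_head (· == c) rest x r hD
        rw [pvDedup_head c x r hx]
        have ih := pvCollapse_eq (x :: r)
        simpa [pvDedup] using ih
    show pvDedup (c :: rest) = pvCollapseB (c :: rest)
    rw [show pvDedup (c :: rest) = c :: pvDedupFrom c rest from rfl]
    conv_lhs => rw [← hsplit]
    rw [pvDedup_run c _ _ ht, hrest]
    conv_rhs => rw [pvCollapseB]
    rw [show pvPiecesB (c :: rest) =
        (if c ∈ pvVowelsB then c :: rest.takeWhile (· == c) else [c]) ::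
        pvPiecesB (rest.drop (rest.takeWhile (· == c)).length) from by
      conv_lhs => rw [pvPiecesB.eq_def]]
    simp only [List.flatten_cons]
    rw [pvVowel_eq]
    have htail : (pvPiecesB (rest.drop (rest.takeWhile (· == c)).length)).flatten =
        pvCollapseB (rest.drop (rest.takeWhile (· == c)).length) := rfl
    rw [htail]
    by_cases hv : c ∈ pvVowelsB
    · simp [hv]
    · simp [hv]
termination_by l.length
decreasing_by
  have h := congrArg List.length hD
  simp [List.length_drop] at h
  simp
  omega

-- ===== VERDICT (by name: the statement is the Claim_ definition above) =====
theorem yearSeven_spec : Claim_equal_yearSeven := by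
  intro words _
  unfold Spec_yearSeven yearSeven yearSeven_alt
  simp only []
  congr 2
  apply List.map_congr_left
  intro w _
  have h0 : pvLoopA w 0 = pvDedup w := by
    cases w with
    | nil => rw [pvLoopA]; simp [pvDedup]
    | cons c r =>
      rw [pvLoopA_inv _ 0 (by simp)]
      simp [pvDedup]
  rw [h0, pvCollapse_eq]
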